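-- pv_equiv track=rewrite | github.com/MrBrantCode/unitest_baseline | mut_generate/mist_train_cf/cf_40845/solution.py | calculate_total_injuries
-- ===== SOURCE A (Python) =====
-- from typing import List
--
-- def calculate_total_injuries(injuries: List[int]) -> int:
--     total_injuries = 0
--     prev_injuries = 0
--     prev_prev_injuries = 0
--
--     for current_injuries in injuries:
--         total_injuries += current_injuries + prev_injuries - prev_prev_injuries
--         prev_prev_injuries = prev_injuries
--         prev_injuries = current_injuries
--
--     return total_injuries
-- ===== SOURCE B (Python) =====
-- from typing import List
--
-- def calculate_total_injuries(injuries: List[int]) -> int: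
--     return sum(injuries) + (injuries[-2] if len(injuries) >= 2 else 0)
-- ===== Notes on version B (the rewrite author's own statement) =====
-- stated objective: simpler
-- what changed: Replaced the stateful prev/prev-prev loop by the telescoped closed form: built-in sum(injuries) plus the second-to-last element (0 when fewer than two elements).
import Mathlib
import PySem

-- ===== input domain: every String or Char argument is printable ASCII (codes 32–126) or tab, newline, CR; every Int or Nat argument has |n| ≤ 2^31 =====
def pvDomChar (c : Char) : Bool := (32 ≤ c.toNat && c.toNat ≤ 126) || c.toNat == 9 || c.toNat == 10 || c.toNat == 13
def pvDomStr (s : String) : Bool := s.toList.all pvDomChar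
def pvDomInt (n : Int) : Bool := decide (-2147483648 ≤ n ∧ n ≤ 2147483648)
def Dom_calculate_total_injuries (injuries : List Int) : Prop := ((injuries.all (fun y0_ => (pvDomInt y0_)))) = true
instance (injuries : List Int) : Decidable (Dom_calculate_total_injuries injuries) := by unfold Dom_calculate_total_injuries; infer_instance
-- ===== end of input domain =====

-- ===== PORT A =====
-- B replaces the stateful loop by the telescoped closed form: sum + second-to-last (0 if len < 2).
def calculate_total_injuries (injuries : List Int) : Int :=
  (injuries.foldl
    (fun (st : Int × Int × Int) current_injuries =>
      let total_injuries := st.1 + current_injuries + st.2.1 - st.2.2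
      (total_injuries, current_injuries, st.2.1))
    (0, 0, 0)).1

-- ===== PORT B =====
def calculate_total_injuries_alt (injuries : List Int) : Int :=
  injuries.sum + (if 2 ≤ injuries.length then (PySem.List.pyGet? injuries (-2)).getD 0 else 0)

-- ===== PRECONDITION & SPEC =====
def Spec_calculate_total_injuries (injuries : List Int) (out : Int) : Prop := out = calculate_total_injuries_alt injuries
instance (injuries : List Int) (out : Int) : Decidable (Spec_calculate_total_injuries injuries out) := by unfold Spec_calculate_total_injuries; infer_instance

-- ===== CLAIM (what is proved, stated in full; the proofs are below) =====
def Claim_equal_calculate_total_injuries : Prop := ∀ (injuries : List Int), Dom_calculate_total_injuries injuries → Spec_calculate_total_injuries injuries (calculate_total_injuries injuries)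

-- ===== LEMMAS AND PROOFS =====

-- ===== VERDICT (by name: the statement is the Claim_ definition above) =====
-- second-to-last element with default 0
def pvPenult (l : List Int) : Int := l.getD (l.length - 2) 0

theorem pvPenult_cons (x : Int) (l : List Int) (h : 2 ≤ l.length) :
    pvPenult (x :: l) = pvPenult l := by
  unfold pvPenult
  have : (x :: l).length - 2 = (l.length - 2) + 1 := by simp only [List.length_cons]; omega
  rw [this, List.getD_cons_succ]

theorem pvLoop_eq (xs : List Int) : ∀ (t p pp : Int),
    (xs.foldl
      (fun (st : Int × Int × Int) c =>
        (st.1 + c + st.2.1 - st.2.2, c, st.2.1)) (t, p, pp)).1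
    = t + xs.sum + pvPenult (pp :: p :: xs) - pp := by
  induction xs with
  | nil => intro t p pp; simp [pvPenult]
  | cons a l ih =>
    intro t p pp
    simp only [List.foldl_cons, List.sum_cons]
    rw [ih, pvPenult_cons pp (p :: a :: l) (by simp)]
    ring

theorem calculate_total_injuries_spec : Claim_equal_calculate_total_injuries := by
  intro injuries _
  unfold Spec_calculate_total_injuries calculate_total_injuries calculate_total_injuries_alt
  simp only [pvLoop_eq]
  match injuries with
  | [] => simp [pvPenult]
  | [a] => simp [pvPenult]
  | a :: b :: l =>
    have hlen : 2 ≤ (a :: b :: l).length := by simp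
    rw [pvPenult_cons 0 (0 :: a :: b :: l) (by simp), pvPenult_cons 0 (a :: b :: l) hlen]
    rw [if_pos hlen, PySem.List.pyGet?_neg_ofNat _ 2 (by omega) hlen]
    unfold pvPenult
    simp [List.getD]
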